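-- pv_equiv track=rewrite | github.com/grassking100/deep_gene_annotator | sequence_annotation/process/boundary_process.py | get_exon_boundary
-- ===== SOURCE A (Python) =====
-- def get_exon_boundary(rna_boundary,intron_boundarys):
--     """Get list of exon boundarys based on gene boundary and intron boundarys
--
--     Parameters:
--     ----------
--     rna_boundary : list (tuple)
--         List of paired sites of RNA's start site and end site in one based
--     intron_boundarys : list (tuple)
--         List of paired sites of intron's start site and end site in one based
--
--     Returns:
--     ----------
--     list (tuple)
--         List of paired sites of exon's start site and end site in one based
--     """
--     intron_boundarys = sorted(intron_boundarys,key=lambda x: x[0])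
--
--     exon_start = rna_boundary[0]
--     exon_boundarys = []
--     for intron_boundary in intron_boundarys:
--         intron_start, intron_end = intron_boundary
--         exon_end = intron_start - 1
--         if exon_start < exon_end:
--             exon_boundarys.append((exon_start,exon_end))
--         exon_start = intron_end + 1
--
--     exon_end = rna_boundary[1]
--     if exon_start < exon_end:
--         exon_boundarys.append((exon_start,exon_end))
--     return exon_boundarys
-- ===== SOURCE B (Python) =====
-- def get_exon_boundary(rna_boundary, intron_boundarys):
--     def exons_upto(introns, exon_end):
--         # exons of the region ending at exon_end, given the introns to its left
--         if not introns:
--             return [(rna_boundary[0], exon_end)] if rna_boundary[0] < exon_end else []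
--         intron_start, intron_end = introns[-1]
--         result = exons_upto(introns[:-1], intron_start - 1)
--         if intron_end + 1 < exon_end:
--             result.append((intron_end + 1, exon_end))
--         return result
--     return exons_upto(sorted(intron_boundarys, key=lambda x: x[0]), rna_boundary[1])
-- ===== Notes on version B (the rewrite author's own statement) =====
-- stated objective: alternative
-- what changed: Replaces the forward loop threading a running exon_start and appending as it goes with a right-to-left recursion that threads the running exon END: it peels the last sorted intron, recurses on the prefix with that intron's start-1 as the new right boundary, and builds the output back-to-front.
import Mathlib
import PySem

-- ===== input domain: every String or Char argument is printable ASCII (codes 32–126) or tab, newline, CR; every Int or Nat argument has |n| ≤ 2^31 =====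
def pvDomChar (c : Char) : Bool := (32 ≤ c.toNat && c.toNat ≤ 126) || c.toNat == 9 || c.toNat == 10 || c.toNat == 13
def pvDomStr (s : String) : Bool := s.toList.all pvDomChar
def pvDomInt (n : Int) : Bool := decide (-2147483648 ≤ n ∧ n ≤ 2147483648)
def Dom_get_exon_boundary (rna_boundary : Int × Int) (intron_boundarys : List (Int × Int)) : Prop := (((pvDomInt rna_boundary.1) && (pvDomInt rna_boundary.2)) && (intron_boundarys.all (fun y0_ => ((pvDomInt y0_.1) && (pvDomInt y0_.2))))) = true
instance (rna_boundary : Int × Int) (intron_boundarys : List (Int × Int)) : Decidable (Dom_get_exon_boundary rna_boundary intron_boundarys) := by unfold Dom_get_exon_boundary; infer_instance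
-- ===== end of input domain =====

-- B traverses the sorted introns right-to-left by recursion threading the running exon END (A loops left-to-right threading exon_start): alternative decomposition, same cost.

-- ===== PORT A =====
def get_exon_boundary (rna_boundary : Int × Int) (intron_boundarys : List (Int × Int)) : List (Int × Int) :=
  let sorted := PySem.List.sorted intron_boundarys (fun x => x.1) false
  let st := sorted.foldl (fun (s : Int × List (Int × Int)) intron_boundary =>
    let exon_end := intron_boundary.1 - 1
    let acc := if s.1 < exon_end then s.2 ++ [(s.1, exon_end)] else s.2
    (intron_boundary.2 + 1, acc)) (rna_boundary.1, [])
  if st.1 < rna_boundary.2 then st.2 ++ [(st.1, rna_boundary.2)] else st.2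

-- ===== PORT B =====
-- recursion peels the LAST intron (introns[-1] / introns[:-1]), terminating by list length
def exons_upto (r1 : Int) (introns : List (Int × Int)) (exon_end : Int) : List (Int × Int) :=
  match h : introns.getLast? with
  | none => if r1 < exon_end then [(r1, exon_end)] else []
  | some ib =>
      let result := exons_upto r1 introns.dropLast (ib.1 - 1)
      if ib.2 + 1 < exon_end then result ++ [(ib.2 + 1, exon_end)] else result
termination_by introns.length
decreasing_by
  cases introns with
  | nil => simp at h
  | cons a l => simp

def get_exon_boundary_alt (rna_boundary : Int × Int) (intron_boundarys : List (Int × Int)) : List (Int × Int) :=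
  exons_upto rna_boundary.1 (PySem.List.sorted intron_boundarys (fun x => x.1) false) rna_boundary.2

-- ===== PRECONDITION & SPEC =====
def Spec_get_exon_boundary (rna_boundary : Int × Int) (intron_boundarys : List (Int × Int)) (out : List (Int × Int)) : Prop := out = get_exon_boundary_alt rna_boundary intron_boundarys
instance (rna_boundary : Int × Int) (intron_boundarys : List (Int × Int)) (out : List (Int × Int)) : Decidable (Spec_get_exon_boundary rna_boundary intron_boundarys out) := by unfold Spec_get_exon_boundary; infer_instance

-- ===== CLAIM (what is proved, stated in full; the proofs are below) =====
def Claim_equal_get_exon_boundary : Prop := ∀ (rna_boundary : Int × Int) (intron_boundarys : List (Int × Int)), Dom_get_exon_boundary rna_boundary intron_boundarys → Spec_get_exon_boundary rna_boundary intron_boundarys (get_exon_boundary rna_boundary intron_boundarys)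

-- ===== LEMMAS AND PROOFS =====

theorem exons_upto_concat (r1 : Int) (l : List (Int × Int)) (x : Int × Int) (e2 : Int) :
    exons_upto r1 (l ++ [x]) e2 =
      (if x.2 + 1 < e2 then exons_upto r1 l (x.1 - 1) ++ [(x.2 + 1, e2)]
       else exons_upto r1 l (x.1 - 1)) := by
  rw [exons_upto]
  split
  · next h => simp at h
  · next ib h =>
      rw [List.getLast?_concat] at h
      injection h with h
      subst h
      simp

-- A's loop (finished by its tail step with right end e2) equals B's right-to-left recursion.
theorem exon_loop_eq (r1 : Int) (l : List (Int × Int)) :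
    ∀ (e2 : Int),
    (let st := l.foldl (fun (s : Int × List (Int × Int)) ib =>
        let exon_end := ib.1 - 1
        let acc := if s.1 < exon_end then s.2 ++ [(s.1, exon_end)] else s.2
        (ib.2 + 1, acc)) (r1, [])
     if st.1 < e2 then st.2 ++ [(st.1, e2)] else st.2)
    = exons_upto r1 l e2 := by
  induction l using List.reverseRecOn with
  | nil =>
      intro e2
      rw [exons_upto]
      simp [List.foldl]
  | append_singleton l x ih =>
      intro e2
      rw [exons_upto_concat]
      simp only [List.foldl_append, List.foldl_cons, List.foldl_nil]
      rw [← ih (x.1 - 1)]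

-- ===== VERDICT (by name: the statement is the Claim_ definition above) =====
theorem get_exon_boundary_spec : Claim_equal_get_exon_boundary := by
  intro rna introns _
  unfold Spec_get_exon_boundary get_exon_boundary get_exon_boundary_alt
  simpa using exon_loop_eq rna.1 (PySem.List.sorted introns (fun x => x.1) false) rna.2
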